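-- pv_equiv track=rewrite | github.com/alexapvl/Babes-Bolyai-University | Semester5/PKC/Labs/lab4/rsa.py | text_to_number
-- ===== SOURCE A (Python) =====
-- def text_to_number(text, block_size):
--     """
--     Convert text to numbers using 27-letter alphabet
--     '_' (space) = 0, 'A' = 1, 'B' = 2, ..., 'Z' = 26
--
--     Blocks are formed using base-27 representation:
--     For block "ab": value = a * 27 + b
--     """
--     # Normalize text: uppercase and replace spaces with '_'
--     text = text.upper().replace(' ', '_')
--
--     blocks = []
--     for i in range(0, len(text), block_size):
--         block = text[i:i + block_size]
--         number = 0
--         for char in block: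
--             if char == '_':
--                 digit = 0
--             elif 'A' <= char <= 'Z':
--                 digit = ord(char) - ord('A') + 1
--             else:
--                 raise ValueError(f"Invalid character: {char}")
--             number = number * 27 + digit
--         blocks.append(number)
--
--     return blocks
-- ===== SOURCE B (Python) =====
-- def _char_digit(c):
--     if c == '_':
--         return 0
--     elif 'A' <= c <= 'Z':
--         return ord(c) - ord('A') + 1
--     else:
--         raise ValueError(f"Invalid character: {c}")
--
--
-- def _block_value(block):
--     digits = [_char_digit(c) for c in block]
--     value, place = 0, 1
--     for d in reversed(digits):
--         value += d * place
--         place *= 27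
--     return value
--
--
-- def text_to_number(text, block_size):
--     s = text.upper().replace(' ', '_')
--     return [_block_value(s[i:i + block_size]) for i in range(0, len(s), block_size)]
-- ===== Notes on version B (the rewrite author's own statement) =====
-- stated objective: alternative
-- what changed: A's single fused loop (Horner accumulation with inline per-character validation) is replaced by a per-block decomposition: each block is first mapped to a digit list by a validating helper, then evaluated right-to-left with an explicit place-value accumulator.
import Mathlib
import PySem

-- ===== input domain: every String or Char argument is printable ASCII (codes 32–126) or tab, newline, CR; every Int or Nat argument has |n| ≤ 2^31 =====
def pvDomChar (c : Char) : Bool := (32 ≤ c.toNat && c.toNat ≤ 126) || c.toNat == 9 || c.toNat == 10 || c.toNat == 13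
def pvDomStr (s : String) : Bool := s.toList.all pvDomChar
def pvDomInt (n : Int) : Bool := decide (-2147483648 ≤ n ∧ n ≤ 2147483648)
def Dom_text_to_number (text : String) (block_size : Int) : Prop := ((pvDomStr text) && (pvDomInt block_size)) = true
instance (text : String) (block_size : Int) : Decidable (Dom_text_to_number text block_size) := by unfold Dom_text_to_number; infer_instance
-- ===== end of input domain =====

-- B replaces A's single fused Horner loop by a per-block decomposition: a validating
-- map-to-digits pass, then a reversed place-value accumulation (objective: alternative, same cost).

-- ===== PORT A =====
def text_to_number (text : String) (block_size : Int) : List Int :=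
  let t : List Char := (PySem.Str.replace (PySem.Str.upper text) " " "_").toList
  (PySem.List.pyRange 0 (t.length : Int) block_size).foldl
    (fun blocks i =>
      let block := PySem.List.slice t (some i) (some (i + block_size))
      let number := block.foldl
        (fun number ch =>
          let digit : Int :=
            if ch = '_' then 0
            else if 'A' ≤ ch ∧ ch ≤ 'Z' then (ch.toNat : Int) - 65 + 1
            else 0  -- Python raises ValueError here; such inputs are excluded by Pre_
          number * 27 + digit) 0
      blocks ++ [number]) []

-- ===== PORT B =====
def pvCharDigit (ch : Char) : Int :=
  if ch = '_' then 0
  else if 'A' ≤ ch ∧ ch ≤ 'Z' then (ch.toNat : Int) - 65 + 1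
  else 0  -- Python raises ValueError here; such inputs are excluded by Pre_

def pvBlockValue (block : List Char) : Int :=
  let digits := block.map pvCharDigit
  let vp := digits.reverse.foldl
    (fun (vp : Int × Int) d => (vp.1 + d * vp.2, vp.2 * 27)) (0, 1)
  vp.1

def text_to_number_alt (text : String) (block_size : Int) : List Int :=
  let s : List Char := (PySem.Str.replace (PySem.Str.upper text) " " "_").toList
  (PySem.List.pyRange 0 (s.length : Int) block_size).map
    (fun i => pvBlockValue (PySem.List.slice s (some i) (some (i + block_size))))

-- ===== PRECONDITION & SPEC =====
-- Pre_ excludes exactly the inputs where the Python raises ValueError: block_size = 0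
-- (range step 0), or a positive block_size with an invalid character in the normalized text.
def Pre_text_to_number (text : String) (block_size : Int) : Prop :=
  block_size ≠ 0 ∧ (0 < block_size →
    ((PySem.Str.replace (PySem.Str.upper text) " " "_").toList).all
      (fun c => c == '_' || ('A' ≤ c && c ≤ 'Z')) = true)
instance (text : String) (block_size : Int) : Decidable (Pre_text_to_number text block_size) := by
  unfold Pre_text_to_number; infer_instance

def pvWitness_text_to_number : String × Int := ("Hello World", 3)

def Spec_text_to_number (text : String) (block_size : Int) (out : List Int) : Prop :=
  out = text_to_number_alt text block_size
instance (text : String) (block_size : Int) (out : List Int) : Decidable (Spec_text_to_number text block_size out) := by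
  unfold Spec_text_to_number; infer_instance

-- ===== CLAIM (what is proved, stated in full; the proofs are below) =====
def Claim_equal_text_to_number : Prop := ∀ (text : String) (block_size : Int), Dom_text_to_number text block_size → Pre_text_to_number text block_size → Spec_text_to_number text block_size (text_to_number text block_size)

-- ===== LEMMAS AND PROOFS =====

-- Horner of xs ++ [r].
lemma pv_horner_snoc (xs : List Int) (r : Int) :
    (xs ++ [r]).foldl (fun n d => n * 27 + d) 0
      = (xs.foldl (fun n d => n * 27 + d) 0) * 27 + r := by
  simp [List.foldl_append]

-- The reversed place-value accumulation computes Horner of the reversed list.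
lemma pv_place_fold (rs : List Int) (v p : Int) :
    rs.foldl (fun (vp : Int × Int) d => (vp.1 + d * vp.2, vp.2 * 27)) (v, p)
      = (v + (rs.reverse.foldl (fun n d => n * 27 + d) 0) * p, p * 27 ^ rs.length) := by
  induction rs generalizing v p with
  | nil => simp
  | cons r rest ih =>
    simp only [List.foldl_cons, List.reverse_cons, List.length_cons]
    rw [ih, pv_horner_snoc]
    refine Prod.ext ?_ ?_
    · simp; ring
    · simp [pow_succ]; ring

-- A's fused Horner loop over a block equals B's block value.
lemma pv_block_eq (blk : List Char) :
    blk.foldl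
        (fun number ch =>
          let digit : Int :=
            if ch = '_' then 0
            else if 'A' ≤ ch ∧ ch ≤ 'Z' then (ch.toNat : Int) - 65 + 1
            else 0
          number * 27 + digit) 0
      = pvBlockValue blk := by
  unfold pvBlockValue
  have hfold : blk.foldl
      (fun number ch =>
        let digit : Int :=
          if ch = '_' then 0
          else if 'A' ≤ ch ∧ ch ≤ 'Z' then (ch.toNat : Int) - 65 + 1
          else 0
        number * 27 + digit) 0
      = (blk.map pvCharDigit).foldl (fun n d => n * 27 + d) 0 := by
    rw [List.foldl_map]
    rfl
  rw [hfold]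
  show _ = (List.foldl (fun (vp : Int × Int) d => (vp.1 + d * vp.2, vp.2 * 27)) (0, 1)
      (List.map pvCharDigit blk).reverse).1
  rw [pv_place_fold]
  simp

-- ===== VERDICT (by name: the statement is the Claim_ definition above) =====
theorem text_to_number_spec : Claim_equal_text_to_number := by
  intro text block_size _ _
  unfold Spec_text_to_number text_to_number text_to_number_alt
  rw [PySem.List.foldl_append_singleton_eq_map]
  simp only [List.nil_append]
  apply List.map_congr_left
  intro i _
  exact pv_block_eq _
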